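-- pv_equiv track=rewrite | github.com/yangchoi/Algorithm | codility/time_complexity/tape_equilibrium.py | solution
-- ===== SOURCE A (Python) =====
-- def solution(A):
--     first = A[0]
--     second = sum(A[1:])
--     result = abs(first - second)
--
--     for i in range(1, len(A) - 1) :
--         first += A[i]
--         second -= A[i]
--         result = min(result, abs(first - second))
--
--     return result
-- ===== SOURCE B (Python) =====
-- def solution(A):
--     # Different algorithm: sort the candidate prefix sums, then binary-search
--     # for the one closest to total/2 (the minimizer of |2*p - total|);
--     # only the two neighbours of the search point need to be compared.
--     total = sum(A)
--     base = A[:-1] if len(A) > 1 else A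
--     ps = []
--     s = 0
--     for x in base:
--         s += x
--         ps.append(s)
--     ps.sort()
--     # first index with 2*ps[i] >= total
--     lo, hi = 0, len(ps)
--     while lo < hi:
--         mid = (lo + hi) // 2
--         if 2 * ps[mid] < total:
--             lo = mid + 1
--         else:
--             hi = mid
--     cands = []
--     if lo < len(ps):
--         cands.append(abs(2 * ps[lo] - total))
--     if lo > 0:
--         cands.append(abs(2 * ps[lo - 1] - total))
--     return min(cands)
-- ===== Notes on version B (the rewrite author's own statement) =====
-- stated objective: alternative
-- what changed: Replaces A's fused running-min scan over all split points by a sort-then-binary-search algorithm: the candidate prefix sums are sorted, a hand-written binary search finds the first one p with 2*p >= total, and only its two neighbours are compared, since |2*p - total| is minimized at the prefix sum nearest to total/2; the empty list (where A raises IndexError) is excluded by Pre_.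
import Mathlib
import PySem

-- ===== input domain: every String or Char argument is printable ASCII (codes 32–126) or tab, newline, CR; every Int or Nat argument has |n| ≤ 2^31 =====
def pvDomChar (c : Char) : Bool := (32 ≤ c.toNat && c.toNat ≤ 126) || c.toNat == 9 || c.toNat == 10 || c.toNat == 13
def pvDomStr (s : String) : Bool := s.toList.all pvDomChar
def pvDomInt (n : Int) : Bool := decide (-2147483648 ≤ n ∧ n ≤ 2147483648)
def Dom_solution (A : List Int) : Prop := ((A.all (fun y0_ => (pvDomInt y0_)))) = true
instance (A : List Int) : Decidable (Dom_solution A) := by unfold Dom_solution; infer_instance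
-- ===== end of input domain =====

-- B replaces A's fused running-min scan by a different algorithm: sort the candidate
-- prefix sums, binary-search the first one p with 2*p >= total, and compare only its
-- two neighbours (|2*p - total| is minimized at the prefix sum nearest total/2).

-- ===== PORT A =====
def solution (A : List Int) : Int :=
  -- indexing the first element raises IndexError on the empty list: excluded by Pre_solution
  let first := PySem.List.pyGetD A 0 0
  let second := (PySem.List.slice A (some 1) none).sum
  let result := |first - second|
  let st := (PySem.List.pyRange 1 (PySem.List.len A - 1) 1).foldl
    (fun (st : Int × Int × Int) i =>
      let a := PySem.List.pyGetD A i 0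
      (st.1 + a, st.2.1 - a, min st.2.2 |st.1 + a - (st.2.1 - a)|))
    (first, second, result)
  st.2.2

-- ===== PORT B =====
-- midpoint bounds for the binary-search loop (cited by the port's decreasing_by)
theorem bsearch_mid_bounds (lo hi : Int) (h : lo < hi) :
    lo ≤ PySem.Int.floordiv (lo + hi) 2 ∧ PySem.Int.floordiv (lo + hi) 2 < hi := by
  refine ⟨(PySem.Int.floordiv_two_mid_bounds (le_of_lt h)).1, ?_⟩
  rw [PySem.Int.floordiv_lt_iff_lt_mul (by omega : (0:Int) < 2)]
  omega

-- the hand-written while loop of Source B: first index in [lo, hi) with 2*ps[i] >= total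
def bsearchB (ps : List Int) (total : Int) (lo hi : Int) : Int :=
  if h : lo < hi then
    let mid := PySem.Int.floordiv (lo + hi) 2
    if 2 * PySem.List.pyGetD ps mid 0 < total then bsearchB ps total (mid + 1) hi
    else bsearchB ps total lo mid
  else lo
termination_by (hi - lo).toNat
decreasing_by
  · have := bsearch_mid_bounds lo hi h; omega
  · have := bsearch_mid_bounds lo hi h; omega

def solution_alt (A : List Int) : Int :=
  let total := A.sum
  let base := if 1 < PySem.List.len A then PySem.List.slice A none (some (-1)) else A
  let ps := (base.foldl (fun (st : Int × List Int) x => (st.1 + x, st.2 ++ [st.1 + x])) (0, [])).2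
  let s := PySem.List.sorted ps (fun y => y) false
  let lo := bsearchB s total 0 (PySem.List.len s)
  let cands := (if lo < PySem.List.len s then [|2 * PySem.List.pyGetD s lo 0 - total|] else []) ++
               (if 0 < lo then [|2 * PySem.List.pyGetD s (lo - 1) 0 - total|] else [])
  -- min() raises ValueError on an empty cands list (only when A = []): excluded by Pre_solution
  (PySem.List.min? cands (fun y => y)).getD 0

-- ===== PRECONDITION & SPEC =====
-- Pre_ excludes only the empty list, on which A raises IndexError at its first subscript (and B's min() raises too).
def Pre_solution (A : List Int) : Prop := A ≠ []
instance (A : List Int) : Decidable (Pre_solution A) := by unfold Pre_solution; infer_instance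
def pvWitness_solution : List Int := [3, 1, 2, 4, 3]

def Spec_solution (A : List Int) (out : Int) : Prop := out = solution_alt A
instance (A : List Int) (out : Int) : Decidable (Spec_solution A out) := by unfold Spec_solution; infer_instance

-- ===== CLAIM (what is proved, stated in full; the proofs are below) =====
def Claim_equal_solution : Prop := ∀ (A : List Int), Dom_solution A → Pre_solution A → Spec_solution A (solution A)

-- ===== LEMMAS AND PROOFS =====

-- the list of prefix sums of xs started from p
def pref : List Int → Int → List Int
  | [], _ => []
  | x :: t, p => (p + x) :: pref t (p + x)

theorem build_eq (xs : List Int) : ∀ (p : Int) (acc : List Int),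
    xs.foldl (fun (st : Int × List Int) x => (st.1 + x, st.2 ++ [st.1 + x])) (p, acc)
      = (p + xs.sum, acc ++ pref xs p) := by
  induction xs with
  | nil => intro p acc; simp [pref]
  | cons x t ih =>
    intro p acc
    simp only [List.foldl_cons, List.sum_cons, pref, ih]
    rw [Prod.mk.injEq]
    exact ⟨by ring, by simp⟩

theorem loopA (xs : List Int) : ∀ (f r total : Int),
    (xs.foldl (fun (st : Int × Int × Int) a =>
        (st.1 + a, st.2.1 - a, min st.2.2 |st.1 + a - (st.2.1 - a)|)) (f, total - f, r)).2.2
      = ((pref xs f).map (fun q => |2 * q - total|)).foldl min r := by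
  induction xs with
  | nil => intro f r total; simp [pref]
  | cons x t ih =>
    intro f r total
    simp only [List.foldl_cons, pref, List.map_cons]
    have h1 : total - f - x = total - (f + x) := by ring
    have h2 : |f + x - (total - (f + x))| = |2 * (f + x) - total| := by ring_nf
    rw [h1, h2, ih]

theorem fold_range_get {σ : Type} (A : List Int) (b : Int) (hb : b ≤ (A.length : Int))
    (g : σ → Int → σ) (init : σ) :
    (PySem.List.pyRange 1 b 1).foldl (fun st i => g st (PySem.List.pyGetD A i 0)) init
      = ((A.take b.toNat).drop 1).foldl g init := by
  by_cases hb1 : b ≤ 1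
  · rw [PySem.List.pyRange_one_eq_nil hb1]
    have : ((A.take b.toNat).drop 1) = [] := by
      have : (A.take b.toNat).length ≤ 1 := by
        have := List.length_take_le b.toNat A
        omega
      have hlen : ((A.take b.toNat).drop 1).length = 0 := by
        simp; omega
      exact List.eq_nil_of_length_eq_zero hlen
    rw [this]
    rfl
  · rw [not_le] at hb1
    have hb0 : (0 : Int) ≤ b := by omega
    have hlen : ((A.take b.toNat).length : Int) = b := by
      have : b.toNat ≤ A.length := by omega
      simp [this]; omega
    have hcongr :
        (PySem.List.pyRange 1 b 1).foldl (fun st i => g st (PySem.List.pyGetD A i 0)) init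
          = (PySem.List.pyRange 1 b 1).foldl
              (fun st i => g st (PySem.List.pyGetD (A.take b.toNat) i 0)) init := by
      apply PySem.List.foldl_congr_mem
      intro acc i hi
      rw [PySem.List.mem_pyRange_one] at hi
      have h0i : (0 : Int) ≤ i := by omega
      have hiA : i < (A.length : Int) := by omega
      rw [PySem.List.pyGetD_eq_getElem A 0 h0i hiA,
          PySem.List.pyGetD_eq_getElem (A.take b.toNat) 0 h0i (by simp; omega)]
      simp [List.getElem_take]
    have hmain := PySem.List.foldl_pyRange_pyGetD' (A.take b.toNat) 0 g init (a := 1) (by omega)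
    rw [hlen] at hmain
    rw [hcongr, hmain]
    norm_num

-- the binary-search loop of Source B returns the first index with 2*s[i] >= T (s sorted ascending)
theorem bsearchB_spec (s : List Int) (T : Int) (hs : s.Pairwise (· ≤ ·)) : ∀ (n : Nat) (lo hi : Int),
    (hi - lo).toNat = n → 0 ≤ lo → lo ≤ hi → hi ≤ (s.length : Int) →
    (∀ j : Nat, (_ : j < s.length) → (j : Int) < lo → 2 * s[j] < T) →
    (∀ j : Nat, (_ : j < s.length) → hi ≤ (j : Int) → T ≤ 2 * s[j]) →
    (0 ≤ bsearchB s T lo hi ∧ bsearchB s T lo hi ≤ (s.length : Int) ∧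
     (∀ j : Nat, (_ : j < s.length) → (j : Int) < bsearchB s T lo hi → 2 * s[j] < T) ∧
     (∀ j : Nat, (_ : j < s.length) → bsearchB s T lo hi ≤ (j : Int) → T ≤ 2 * s[j])) := by
  have hmono : ∀ (i j : Nat) (_ : i < s.length) (_ : j < s.length), i ≤ j → s[i] ≤ s[j] := by
    intro i j hi hj hij
    rcases Nat.lt_or_ge i j with hlt | hge
    · exact (List.pairwise_iff_getElem.mp hs) i j hi hj hlt
    · have : i = j := by omega
      subst this; exact le_refl _
  intro n
  induction n using Nat.strong_induction_on with
  | _ n ih =>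
    intro lo hi hn h0 hlohi hhil hlow hhigh
    rw [bsearchB]
    by_cases h : lo < hi
    · rw [dif_pos h]
      obtain ⟨hm1, hm2⟩ := bsearch_mid_bounds lo hi h
      set mid := PySem.Int.floordiv (lo + hi) 2 with hmid
      have hmlt : mid.toNat < s.length := by omega
      have hget : PySem.List.pyGetD s mid 0 = s[mid.toNat] := by
        rw [PySem.List.pyGetD_eq_getElem s 0 (by omega) (by omega)]
      by_cases hc : 2 * PySem.List.pyGetD s mid 0 < T
      · rw [if_pos hc]
        rw [hget] at hc
        refine ih ((hi - (mid + 1)).toNat) (by omega) (mid + 1) hi rfl (by omega) (by omega) hhil ?_ hhigh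
        intro j hjl hj
        have : s[j] ≤ s[mid.toNat] := hmono j mid.toNat hjl hmlt (by omega)
        omega
      · rw [if_neg hc]
        rw [hget] at hc
        refine ih ((mid - lo).toNat) (by omega) lo mid rfl h0 (by omega) (by omega) hlow ?_
        intro j hjl hj
        have : s[mid.toNat] ≤ s[j] := hmono mid.toNat j hmlt hjl (by omega)
        omega
    · rw [dif_neg h]
      have : lo = hi := by omega
      exact ⟨h0, by omega, fun j hjl hj => hlow j hjl hj, fun j hjl hj => hhigh j hjl (by omega)⟩

-- the sort + binary-search + two-neighbour comparison computes the running minimum of |2*q - total|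
theorem main_core (x : Int) (R : List Int) (total : Int) :
    (let s := PySem.List.sorted (x :: R) (fun y => y) false
     let lo := bsearchB s total 0 (PySem.List.len s)
     let cands := (if lo < PySem.List.len s then [|2 * PySem.List.pyGetD s lo 0 - total|] else []) ++
                  (if 0 < lo then [|2 * PySem.List.pyGetD s (lo - 1) 0 - total|] else [])
     (PySem.List.min? cands (fun y => y)).getD 0)
      = (R.map (fun q => |2 * q - total|)).foldl min |2 * x - total| := by
  dsimp only
  set f : Int → Int := fun q => |2 * q - total| with hf
  set s := PySem.List.sorted (x :: R) (fun y => y) false with hsdef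
  have hperm : s.Perm (x :: R) := PySem.List.sorted_perm (x :: R) (fun y => y) false
  have hs : s.Pairwise (· ≤ ·) := PySem.List.sorted_pairwise (x :: R) (fun y => y)
  have hmono : ∀ (i j : Nat) (_ : i < s.length) (_ : j < s.length), i ≤ j → s[i] ≤ s[j] := by
    intro i j hi hj hij
    rcases Nat.lt_or_ge i j with hlt | hge
    · exact (List.pairwise_iff_getElem.mp hs) i j hi hj hlt
    · have : i = j := by omega
      subst this; exact le_refl _
  have hslen : s.length = R.length + 1 := by
    rw [hperm.length_eq]; simp
  have hlenI : PySem.List.len s = (s.length : Int) := PySem.List.len_eq s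
  rw [hlenI]
  obtain ⟨hlo0, hlolen, hlow, hhigh⟩ :=
    bsearchB_spec s total hs ((s.length : Int) - 0).toNat 0 (s.length : Int) rfl (le_refl 0)
      (by omega) (le_refl _) (by intro j hjl hj; omega) (by intro j hjl hj; omega)
  set lo := bsearchB s total 0 (s.length : Int) with hlodef
  set A_res := (R.map f).foldl min (f x) with hA
  have hAle : ∀ y ∈ (x :: R).map f, A_res ≤ y := by
    intro y hy
    simp only [List.map_cons, List.mem_cons] at hy
    rcases hy with h | h
    · rw [h]; exact (PySem.List.foldl_min_le (R.map f) (f x)).1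
    · exact (PySem.List.foldl_min_le (R.map f) (f x)).2 y h
  have hAmem : A_res ∈ (x :: R).map f := by
    rcases PySem.List.foldl_min_mem (R.map f) (f x) with h | h
    · rw [hA, h]; exact List.mem_map_of_mem (List.mem_cons_self)
    · rw [hA]; simp only [List.map_cons]
      exact List.mem_cons_of_mem _ (by rw [← hA]; exact h)
  set cands := (if lo < (s.length : Int) then [|2 * PySem.List.pyGetD s lo 0 - total|] else []) ++
               (if 0 < lo then [|2 * PySem.List.pyGetD s (lo - 1) 0 - total|] else []) with hcands
  have hc_mem : ∀ y ∈ cands, ∃ i : Nat, ∃ _ : i < s.length, y = f s[i] := by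
    intro y hy
    rw [hcands, List.mem_append] at hy
    rcases hy with hy | hy
    · split at hy
      · rename_i hlt
        simp only [List.mem_singleton] at hy
        refine ⟨lo.toNat, by omega, ?_⟩
        rw [hy, PySem.List.pyGetD_eq_getElem s 0 hlo0 hlt]
      · simp at hy
    · split at hy
      · rename_i hpos
        simp only [List.mem_singleton] at hy
        refine ⟨(lo - 1).toNat, by omega, ?_⟩
        rw [hy, PySem.List.pyGetD_eq_getElem s 0 (by omega) (by omega)]
      · simp at hy
  have hc_ne : cands ≠ [] := by
    rw [hcands]
    by_cases hlt : lo < (s.length : Int)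
    · rw [if_pos hlt]; simp
    · rw [if_neg hlt, if_pos (by omega : (0:Int) < lo)]; simp
  obtain ⟨m, hm⟩ : ∃ m, PySem.List.min? cands (fun y => y) = some m := by
    cases hmm : PySem.List.min? cands (fun y => y) with
    | none => rw [PySem.List.min?_eq_none_iff] at hmm; exact absurd hmm hc_ne
    | some m => exact ⟨m, rfl⟩
  have hm_mem : m ∈ cands := PySem.List.min?_mem hm
  have hm_min : ∀ y ∈ cands, m ≤ y := PySem.List.min?_isMin hm
  rw [hm, Option.getD_some]
  -- m ≥ A_res : every candidate is f of an element of the list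
  have h1 : A_res ≤ m := by
    obtain ⟨i, hi, hmi⟩ := hc_mem m hm_mem
    have : s[i] ∈ (x :: R) := hperm.subset (List.getElem_mem hi)
    rw [hmi]
    exact hAle _ (List.mem_map_of_mem this)
  -- m ≤ A_res : A_res = f z for some element z = s[j]; compare with the neighbour on j's side
  have h2 : m ≤ A_res := by
    obtain ⟨z, hz, hfz⟩ := List.mem_map.mp hAmem
    have hzs : z ∈ s := hperm.mem_iff.mpr hz
    obtain ⟨j, hj, hzj⟩ := List.mem_iff_getElem.mp hzs
    rcases lt_or_ge (j : Int) lo with hjlo | hjlo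
    · -- j on the low side: compare with s[lo-1]
      have hpos : (0 : Int) < lo := by omega
      have hl1 : (lo - 1).toNat < s.length := by omega
      have hc2 : |2 * PySem.List.pyGetD s (lo - 1) 0 - total| ∈ cands := by
        rw [hcands, List.mem_append, if_pos hpos]
        right; simp
      have hg : PySem.List.pyGetD s (lo - 1) 0 = s[(lo - 1).toNat] := by
        rw [PySem.List.pyGetD_eq_getElem s 0 (by omega) (by omega)]
      have hlt1 : 2 * s[(lo - 1).toNat] < total := hlow _ hl1 (by omega)
      have hltj : 2 * s[j] < total := hlow _ hj (by omega)
      have hord : s[j] ≤ s[(lo - 1).toNat] := hmono j (lo - 1).toNat hj hl1 (by omega)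
      have := hm_min _ hc2
      rw [hg] at this
      have e1 : |2 * s[(lo - 1).toNat] - total| = total - 2 * s[(lo - 1).toNat] := by
        rw [abs_of_neg (by omega)]; ring
      have e2 : f z = total - 2 * s[j] := by
        simp only [hf]; rw [← hzj, abs_of_neg (by omega)]; ring
      rw [← hfz, e2]
      omega
    · -- j on the high side: compare with s[lo]
      have hlt : lo < (s.length : Int) := by omega
      have hc1 : |2 * PySem.List.pyGetD s lo 0 - total| ∈ cands := by
        rw [hcands, List.mem_append, if_pos hlt]
        left; simp
      have hg : PySem.List.pyGetD s lo 0 = s[lo.toNat]'(by omega) := by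
        rw [PySem.List.pyGetD_eq_getElem s 0 hlo0 hlt]
      have hge1 : total ≤ 2 * s[lo.toNat]'(by omega) := hhigh _ (by omega) (by omega)
      have hgej : total ≤ 2 * s[j] := hhigh _ hj (by omega)
      have hord : s[lo.toNat]'(by omega) ≤ s[j] := hmono lo.toNat j (by omega) hj (by omega)
      have := hm_min _ hc1
      rw [hg] at this
      have e1 : |2 * s[lo.toNat]'(by omega) - total| = 2 * s[lo.toNat]'(by omega) - total := by
        rw [abs_of_nonneg (by omega)]
      have e2 : f z = 2 * s[j] - total := by
        simp only [hf]; rw [← hzj, abs_of_nonneg (by omega)]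
      rw [← hfz, e2]
      omega
  omega

-- ===== VERDICT (by name: the statement is the Claim_ definition above) =====
theorem solution_spec : Claim_equal_solution := by
  intro A _ hpre
  unfold Spec_solution
  obtain ⟨x, t, rfl⟩ : ∃ x t, A = x :: t := by
    cases A with
    | nil => exact absurd rfl hpre
    | cons x t => exact ⟨x, t, rfl⟩
  unfold solution solution_alt
  -- B-side first: the sliced base list is x :: t.dropLast
  have hbase : (if 1 < PySem.List.len (x :: t) then PySem.List.slice (x :: t) none (some (-1))
      else (x :: t)) = x :: t.dropLast := by
    cases t with
    | nil => simp [PySem.List.len_eq]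
    | cons y u =>
      rw [if_pos (by rw [PySem.List.len_eq]; push_cast [List.length_cons]; omega),
          PySem.List.slice_to_neg_one, List.dropLast_cons_of_ne_nil (by simp)]
  simp only [hbase]
  simp only [PySem.List.pyGetD_zero_cons, PySem.List.slice_from_one, List.tail_cons,
    PySem.List.len_eq, List.length_cons]
  -- A-side: turn the index loop into a fold over elements
  have hrange : (((t.length + 1 : Nat) : Int)) - 1 = (t.length : Int) := by push_cast; ring
  rw [hrange,
      fold_range_get (x :: t) (t.length : Int) (by simp)
        (fun (st : Int × Int × Int) a => (st.1 + a, st.2.1 - a, min st.2.2 |st.1 + a - (st.2.1 - a)|))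
        (x, t.sum, |x - t.sum|)]
  have htake : ((x :: t).take ((t.length : Int)).toNat).drop 1 = t.dropLast := by
    rw [List.dropLast_eq_take, Int.toNat_natCast]
    cases t with
    | nil => simp
    | cons y u => simp
  rw [htake]
  set total : Int := x + t.sum with htotal
  have hr0 : |x - t.sum| = |2 * x - total| := by rw [htotal]; ring_nf
  have hsum : t.sum = total - x := by rw [htotal]; ring
  rw [hr0, hsum, loopA t.dropLast x (|2 * x - total|) total]
  -- B-side: the built prefix list is x :: pref t.dropLast x; then cite main_core
  rw [build_eq (x :: t.dropLast) 0 []]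
  simp only [List.nil_append, List.sum_cons, ← htotal]
  have hpref : pref (x :: t.dropLast) 0 = x :: pref t.dropLast x := by simp [pref]
  rw [hpref]
  exact (main_core x (pref t.dropLast x) total).symm
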